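-- pv_equiv track=rewrite | github.com/Gamerbful/hashage | src/fonctions.py | hexa_to_binary
-- ===== SOURCE A (Python) =====
-- def hexa_to_binary(hexa):
--     hexa_carac = { "A":"1010", "B":"1011", "C":"1100", "D":"1101", "E":"1110", "F":"1111"}
--     bin = []
--     for elt in hexa:
--         renvoi = ""
--         for j in range (0,2):
--             try:
--                 number = int(elt[j])
--                 add = "{0:b}".format(number)
--                 longueur = len(add)
--                 while longueur!=4:
--                     add = "0"+add
--                     longueur +=1
--                 renvoi = renvoi + add
--             except:
--                 renvoi = renvoi+hexa_carac[elt[j]]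
--
--         bin.append(renvoi)
--     return bin
-- ===== SOURCE B (Python) =====
-- _TABLE = {
--     "0": "0000", "1": "0001", "2": "0010", "3": "0011",
--     "4": "0100", "5": "0101", "6": "0110", "7": "0111",
--     "8": "1000", "9": "1001", "A": "1010", "B": "1011",
--     "C": "1100", "D": "1101", "E": "1110", "F": "1111",
-- }
--
--
-- def hexa_to_binary(hexa):
--     bin = []
--     for elt in hexa:
--         bin.append(_TABLE[elt[0]] + _TABLE[elt[1]])
--     return bin
-- ===== Notes on version B (the rewrite author's own statement) =====
-- stated objective: simpler
-- what changed: Replaces the try/except dispatch with int()/format() conversion and a while-padding loop per character by a single precomputed 16-entry lookup table consulted once per hex digit.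
import Mathlib
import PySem

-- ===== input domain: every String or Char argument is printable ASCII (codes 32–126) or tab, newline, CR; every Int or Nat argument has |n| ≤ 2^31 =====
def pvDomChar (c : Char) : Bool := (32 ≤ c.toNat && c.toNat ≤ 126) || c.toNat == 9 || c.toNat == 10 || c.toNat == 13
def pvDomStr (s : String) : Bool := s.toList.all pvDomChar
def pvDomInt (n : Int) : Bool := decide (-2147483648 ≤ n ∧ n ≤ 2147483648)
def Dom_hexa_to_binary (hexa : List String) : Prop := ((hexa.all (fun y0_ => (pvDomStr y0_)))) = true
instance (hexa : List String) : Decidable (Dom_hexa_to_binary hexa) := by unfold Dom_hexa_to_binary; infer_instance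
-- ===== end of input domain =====

-- B replaces A's try/except int()/format()/while-padding per character by a single
-- precomputed 16-entry lookup table (objective: simpler).


-- ===== PORT A =====
-- A's dict {"A":"1010", …} of letter digits
def pvHexCarac : List (Char × String) :=
  [('A', "1010"), ('B', "1011"), ('C', "1100"), ('D', "1101"), ('E', "1110"), ('F', "1111")]

-- "{0:b}".format(number): binary digits of a Nat, most significant first
def pvBinChars : Nat → List Char
  | 0 => ['0']
  | 1 => ['1']
  | n + 2 => pvBinChars ((n + 2) / 2) ++ [if (n + 2) % 2 == 1 then '1' else '0']
decreasing_by simp_wf; omega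

-- A's while-padding loop: prepend '0' until length 4 (the guard '< 4' totalises it;
-- in A, longueur ≤ 4 always holds here, so the computation is the same)
def pvPad (add : List Char) (longueur : Nat) : List Char :=
  if longueur < 4 then pvPad ('0' :: add) (longueur + 1) else add
termination_by 4 - longueur

-- one character of A's inner loop body: try int(c) … except hexa_carac[c]
def pvConvCharA (c : Char) : String :=
  if c.isDigit then
    let add := pvBinChars (c.toNat - 48)
    String.ofList (pvPad add add.length)
  else
    ((pvHexCarac.lookup c).getD "")

def hexa_to_binary (hexa : List String) : List String :=
  hexa.foldl (fun bin elt =>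
    bin ++ [(PySem.List.pyRange 0 2 1).foldl (fun renvoi j =>
      match PySem.Str.pyGet? elt j with
      | some c => renvoi ++ pvConvCharA c
      | none => renvoi) ""]) []

-- ===== PORT B =====
-- B's complete lookup table _TABLE
def pvTable : List (Char × String) :=
  [('0', "0000"), ('1', "0001"), ('2', "0010"), ('3', "0011"),
   ('4', "0100"), ('5', "0101"), ('6', "0110"), ('7', "0111"),
   ('8', "1000"), ('9', "1001"), ('A', "1010"), ('B', "1011"),
   ('C', "1100"), ('D', "1101"), ('E', "1110"), ('F', "1111")]

def pvLook (o : Option Char) : String :=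
  match o with
  | some c => (pvTable.lookup c).getD ""
  | none => ""

def hexa_to_binary_alt (hexa : List String) : List String :=
  hexa.map (fun elt => pvLook (PySem.Str.pyGet? elt 0) ++ pvLook (PySem.Str.pyGet? elt 1))

-- ===== PRECONDITION & SPEC =====
def pvIsHex (c : Char) : Bool :=
  c == '0' || c == '1' || c == '2' || c == '3' || c == '4' || c == '5' || c == '6' ||
  c == '7' || c == '8' || c == '9' || c == 'A' || c == 'B' || c == 'C' || c == 'D' ||
  c == 'E' || c == 'F'

-- Pre_ excludes exactly the inputs on which A raises: a string of length < 2
-- (IndexError) or whose first two characters are not uppercase hex digits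
-- (KeyError from the bare except's dict lookup).
def Pre_hexa_to_binary (hexa : List String) : Prop :=
  ∀ s ∈ hexa, (match s.toList with
    | a :: b :: _ => pvIsHex a && pvIsHex b
    | _ => false) = true
instance (hexa : List String) : Decidable (Pre_hexa_to_binary hexa) := by
  unfold Pre_hexa_to_binary; infer_instance

def pvWitness_hexa_to_binary : List String := ["1F", "0A", "99"]

def Spec_hexa_to_binary (hexa : List String) (out : List String) : Prop := out = hexa_to_binary_alt hexa
instance (hexa : List String) (out : List String) : Decidable (Spec_hexa_to_binary hexa out) := by unfold Spec_hexa_to_binary; infer_instance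

-- ===== CLAIM (what is proved, stated in full; the proofs are below) =====
def Claim_equal_hexa_to_binary : Prop := ∀ (hexa : List String), Dom_hexa_to_binary hexa → Pre_hexa_to_binary hexa → Spec_hexa_to_binary hexa (hexa_to_binary hexa)

-- ===== LEMMAS AND PROOFS =====

-- on a hex digit, A's per-character conversion equals B's table lookup
theorem pvConv_eq {c : Char} (h : pvIsHex c = true) :
    pvConvCharA c = (pvTable.lookup c).getD "" := by
  simp only [pvIsHex, Bool.or_eq_true, beq_iff_eq] at h
  rcases h with ((((((((((((((h | h) | h) | h) | h) | h) | h) | h) | h) | h) | h) | h) | h) | h) | h) | h <;>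
    subst h <;> simp [pvConvCharA, pvBinChars, pvPad, pvHexCarac, pvTable, List.lookup]

-- A's element conversion equals B's, for a valid element
theorem pvElt_eq {s : String}
    (h : (match s.toList with
      | a :: b :: _ => pvIsHex a && pvIsHex b
      | _ => false) = true) :
    (PySem.List.pyRange 0 2 1).foldl (fun renvoi j =>
      match PySem.Str.pyGet? s j with
      | some c => renvoi ++ pvConvCharA c
      | none => renvoi) "" =
    pvLook (PySem.Str.pyGet? s 0) ++ pvLook (PySem.Str.pyGet? s 1) := by
  rcases hl : s.toList with _ | ⟨a, _ | ⟨b, rest⟩⟩ <;> rw [hl] at h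
  · simp at h
  · simp at h
  · simp only [Bool.and_eq_true] at h
    have h0 : PySem.Str.pyGet? s 0 = some a := by
      simp [PySem.Str.pyGet?, PySem.Chars.pyGet?, hl]
    have h1 : PySem.Str.pyGet? s 1 = some b := by
      simp [PySem.Str.pyGet?, PySem.Chars.pyGet?, hl]
    have hr : PySem.List.pyRange 0 2 1 = [(0 : Int), 1] := by decide
    rw [hr]
    simp only [List.foldl, h0, h1, pvLook]
    rw [pvConv_eq h.1, pvConv_eq h.2]
    simp

-- A's foldl-append accumulation is a map
theorem pvFoldl_map (f : String → String) (l : List String) (acc : List String) :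
    l.foldl (fun bin elt => bin ++ [f elt]) acc = acc ++ l.map f := by
  induction l generalizing acc with
  | nil => simp
  | cons x xs ih => simp [List.foldl, ih]

-- ===== VERDICT (by name: the statement is the Claim_ definition above) =====
theorem hexa_to_binary_spec : Claim_equal_hexa_to_binary := by
  intro hexa _ hpre
  unfold Spec_hexa_to_binary hexa_to_binary hexa_to_binary_alt
  rw [pvFoldl_map (fun elt =>
    (PySem.List.pyRange 0 2 1).foldl (fun renvoi j =>
      match PySem.Str.pyGet? elt j with
      | some c => renvoi ++ pvConvCharA c
      | none => renvoi) "")]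
  simp only [List.nil_append]
  apply List.map_congr_left
  intro s hs
  exact pvElt_eq (hpre s hs)
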